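-- pv_equiv track=rewrite | github.com/Manibharathi1905/Sentimental_Analysis | 50_emotion_analysis_raw/streamlit_app.py | templated_reply
-- ===== SOURCE A (Python) =====
-- def templated_reply(labels_list, text):
--     """
--     Simple empathetic template generator.
--     Keep this at module-level so Streamlit always finds it.
--     """
--     low = set(labels_list or [])
--     if any(x in low for x in ["grief","sadness","loneliness","helplessness","despair"]):
--         return "I'm really sorry you're going through this. If you want, tell me more — I'm here to listen."
--     if any(x in low for x in ["anxiety","fear","uncertainty"]):
--         return "That sounds very stressful. Would you like to try a small breathing exercise or talk about what's worrying you?"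
--     if any(x in low for x in ["anger","frustration","resentment"]):
--         return "I can understand why you'd feel upset. Want to talk about what happened or how you'd like it to be different?"
--     if any(x in low for x in ["joy","love","gratitude","relief","pride","excitement"]):
--         return "That sounds meaningful — thank you for sharing. Would you like to say more about that memory?"
--     # fallback
--     return "Thank you for sharing. Would you like to talk more about that or get a few small suggestions to help right now?"
-- ===== SOURCE B (Python) =====
-- _FALLBACK = "Thank you for sharing. Would you like to talk more about that or get a few small suggestions to help right now?"
--
-- _REPLIES = [
--     "I'm really sorry you're going through this. If you want, tell me more — I'm here to listen.",
--     "That sounds very stressful. Would you like to try a small breathing exercise or talk about what's worrying you?",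
--     "I can understand why you'd feel upset. Want to talk about what happened or how you'd like it to be different?",
--     "That sounds meaningful — thank you for sharing. Would you like to say more about that memory?",
-- ]
--
-- _TABLE = {}
-- for _prio, _group in enumerate([
--     ["grief", "sadness", "loneliness", "helplessness", "despair"],
--     ["anxiety", "fear", "uncertainty"],
--     ["anger", "frustration", "resentment"],
--     ["joy", "love", "gratitude", "relief", "pride", "excitement"],
-- ]):
--     for _lab in _group:
--         _TABLE[_lab] = (_prio, _REPLIES[_prio])
--
--
-- def templated_reply(labels_list, text):
--     """Empathetic template generator: one pass over the labels, keeping the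
--     entry with the smallest priority found in a label->(priority, reply) table."""
--     best = None
--     for lab in (labels_list or []):
--         entry = _TABLE.get(lab)
--         if entry is not None and (best is None or entry[0] < best[0]):
--             best = entry
--     return best[1] if best is not None else _FALLBACK
-- ===== Notes on version B (the rewrite author's own statement) =====
-- stated objective: idiomatic
-- what changed: Replaced the four fixed group-membership scans over a set with a single pass over the input labels, looking each up in a label->(priority, reply) dict and keeping the smallest-priority entry.
import Mathlib
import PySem

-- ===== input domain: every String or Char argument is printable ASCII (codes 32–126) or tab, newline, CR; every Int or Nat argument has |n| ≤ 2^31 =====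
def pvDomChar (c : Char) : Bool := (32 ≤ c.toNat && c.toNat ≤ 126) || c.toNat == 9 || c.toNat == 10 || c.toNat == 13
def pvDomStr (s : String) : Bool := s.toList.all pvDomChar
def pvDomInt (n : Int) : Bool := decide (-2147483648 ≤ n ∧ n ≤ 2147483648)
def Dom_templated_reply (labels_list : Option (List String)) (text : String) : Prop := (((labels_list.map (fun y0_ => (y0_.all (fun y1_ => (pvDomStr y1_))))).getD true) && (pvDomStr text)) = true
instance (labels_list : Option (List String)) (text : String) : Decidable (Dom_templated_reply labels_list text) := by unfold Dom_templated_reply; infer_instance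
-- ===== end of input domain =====

-- B replaces A's four fixed group-membership scans over a set by a single pass over the labels
-- with a label -> (priority, reply) table, keeping the smallest priority seen (objective: idiomatic).


-- ===== PORT A =====
def pvG0 : List String := ["grief","sadness","loneliness","helplessness","despair"]
def pvG1 : List String := ["anxiety","fear","uncertainty"]
def pvG2 : List String := ["anger","frustration","resentment"]
def pvG3 : List String := ["joy","love","gratitude","relief","pride","excitement"]
def pvR0 : String := "I'm really sorry you're going through this. If you want, tell me more — I'm here to listen."
def pvR1 : String := "That sounds very stressful. Would you like to try a small breathing exercise or talk about what's worrying you?"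
def pvR2 : String := "I can understand why you'd feel upset. Want to talk about what happened or how you'd like it to be different?"
def pvR3 : String := "That sounds meaningful — thank you for sharing. Would you like to say more about that memory?"
def pvRF : String := "Thank you for sharing. Would you like to talk more about that or get a few small suggestions to help right now?"

def templated_reply (labels_list : Option (List String)) (text : String) : String :=
  let low : PySem.Set String := PySem.Set.ofList (labels_list.getD [])
  if pvG0.any (fun x => PySem.Set.contains low x) then pvR0
  else if pvG1.any (fun x => PySem.Set.contains low x) then pvR1
  else if pvG2.any (fun x => PySem.Set.contains low x) then pvR2
  else if pvG3.any (fun x => PySem.Set.contains low x) then pvR3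
  else pvRF

-- ===== PORT B =====
-- Source B's module-level dict _TABLE, written out in the same insertion order
def pvTable : PySem.Dict String (Int × String) :=
  PySem.Dict.mk
  [("grief",((0:Int),pvR0)),("sadness",(0,pvR0)),("loneliness",(0,pvR0)),("helplessness",(0,pvR0)),("despair",(0,pvR0)),
   ("anxiety",(1,pvR1)),("fear",(1,pvR1)),("uncertainty",(1,pvR1)),
   ("anger",(2,pvR2)),("frustration",(2,pvR2)),("resentment",(2,pvR2)),
   ("joy",(3,pvR3)),("love",(3,pvR3)),("gratitude",(3,pvR3)),("relief",(3,pvR3)),("pride",(3,pvR3)),("excitement",(3,pvR3))]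

def pvStep (best : Option (Int × String)) (lab : String) : Option (Int × String) :=
  match PySem.Dict.get? pvTable lab with
  | none => best
  | some e =>
    match best with
    | none => some e
    | some b => if e.1 < b.1 then some e else some b

def templated_reply_alt (labels_list : Option (List String)) (text : String) : String :=
  let best := (labels_list.getD []).foldl pvStep none
  match best with
  | some b => b.2
  | none => pvRF

-- ===== PRECONDITION & SPEC =====
def Spec_templated_reply (labels_list : Option (List String)) (text : String) (out : String) : Prop := out = templated_reply_alt labels_list text
instance (labels_list : Option (List String)) (text : String) (out : String) : Decidable (Spec_templated_reply labels_list text out) := by unfold Spec_templated_reply; infer_instance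

-- ===== CLAIM (what is proved, stated in full; the proofs are below) =====
def Claim_equal_templated_reply : Prop := ∀ (labels_list : Option (List String)) (text : String), Dom_templated_reply labels_list text → Spec_templated_reply labels_list text (templated_reply labels_list text)

-- ===== LEMMAS AND PROOFS =====

-- ent lab: which (priority, reply) pair the table assigns to a label
def pvEnt (lab : String) : Option (Int × String) :=
  if lab ∈ pvG0 then some (0, pvR0)
  else if lab ∈ pvG1 then some (1, pvR1)
  else if lab ∈ pvG2 then some (2, pvR2)
  else if lab ∈ pvG3 then some (3, pvR3)
  else none

lemma get?_mk_eq_none (l : List (String × (Int × String))) (x : String)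
    (h : ∀ p ∈ l, p.1 ≠ x) : (PySem.Dict.mk l).get? x = none := by
  induction l with
  | nil => rfl
  | cons p l ih =>
    rw [PySem.Dict.get?_mk_cons, if_neg, ih]
    · intro q hq; exact h q (List.mem_cons_of_mem _ hq)
    · simp only [beq_iff_eq]; exact h p (List.mem_cons_self)

lemma get?_pvTable (lab : String) : PySem.Dict.get? pvTable lab = pvEnt lab := by
  by_cases hk : lab ∈ ["grief","sadness","loneliness","helplessness","despair",
      "anxiety","fear","uncertainty","anger","frustration","resentment",
      "joy","love","gratitude","relief","pride","excitement"]
  · simp only [List.mem_cons, List.not_mem_nil, or_false] at hk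
    rcases hk with rfl|rfl|rfl|rfl|rfl|rfl|rfl|rfl|rfl|rfl|rfl|rfl|rfl|rfl|rfl|rfl|rfl <;> decide
  · simp only [List.mem_cons, List.not_mem_nil, or_false, not_or] at hk
    obtain ⟨h1,h2,h3,h4,h5,h6,h7,h8,h9,h10,h11,h12,h13,h14,h15,h16,h17⟩ := hk
    rw [show pvTable = PySem.Dict.mk pvTable.items from rfl, get?_mk_eq_none]
    · simp [pvEnt, pvG0, pvG1, pvG2, pvG3, h1,h2,h3,h4,h5,h6,h7,h8,h9,h10,h11,h12,h13,h14,h15,h16,h17]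
    · intro p hp
      simp only [pvTable, List.mem_cons, List.not_mem_nil, or_false] at hp
      rcases hp with rfl|rfl|rfl|rfl|rfl|rfl|rfl|rfl|rfl|rfl|rfl|rfl|rfl|rfl|rfl|rfl|rfl
      exacts [Ne.symm h1, Ne.symm h2, Ne.symm h3, Ne.symm h4, Ne.symm h5, Ne.symm h6,
        Ne.symm h7, Ne.symm h8, Ne.symm h9, Ne.symm h10, Ne.symm h11, Ne.symm h12,
        Ne.symm h13, Ne.symm h14, Ne.symm h15, Ne.symm h16, Ne.symm h17]

-- min-by-priority with left bias
def pvBetter (a b : Option (Int × String)) : Option (Int × String) :=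
  match a, b with
  | none, b => b
  | some x, none => some x
  | some x, some y => if y.1 < x.1 then some y else some x

lemma pvBetter_none_right (a : Option (Int × String)) : pvBetter a none = a := by
  cases a <;> rfl

lemma pvBetter_assoc (a b c : Option (Int × String)) :
    pvBetter (pvBetter a b) c = pvBetter a (pvBetter b c) := by
  cases a with
  | none => rfl
  | some x =>
    cases b with
    | none => cases c <;> rfl
    | some y =>
      cases c with
      | none => rw [pvBetter_none_right, pvBetter_none_right]
      | some z =>
        by_cases h1 : y.1 < x.1 <;> by_cases h2 : z.1 < y.1 <;>
          by_cases h3 : z.1 < x.1 <;>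
          simp [pvBetter, h1, h2, h3] <;> omega

def pvRes (ls : List String) : Option (Int × String) :=
  ls.foldr (fun lab r => pvBetter (pvEnt lab) r) none

lemma pvStep_eq (acc : Option (Int × String)) (lab : String) :
    pvStep acc lab = pvBetter acc (pvEnt lab) := by
  cases h : pvEnt lab <;> cases acc <;>
    simp [pvStep, pvBetter, get?_pvTable, h]

lemma foldl_pvStep (ls : List String) :
    ∀ acc, ls.foldl pvStep acc = pvBetter acc (pvRes ls) := by
  induction ls with
  | nil => intro acc; simp [pvRes, pvBetter_none_right]
  | cons l ls ih =>
    intro acc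
    show (ls.foldl pvStep (pvStep acc l)) = _
    rw [ih, pvStep_eq, pvBetter_assoc]
    rfl

lemma pvRes_char (ls : List String) :
    pvRes ls =
      if ls.any (fun l => decide (l ∈ pvG0)) then some (0, pvR0)
      else if ls.any (fun l => decide (l ∈ pvG1)) then some (1, pvR1)
      else if ls.any (fun l => decide (l ∈ pvG2)) then some (2, pvR2)
      else if ls.any (fun l => decide (l ∈ pvG3)) then some (3, pvR3)
      else none := by
  induction ls with
  | nil => rfl
  | cons l ls ih =>
    show pvBetter (pvEnt l) (pvRes ls) = _
    rw [ih]
    simp only [List.any_cons, Bool.or_eq_true, decide_eq_true_eq, pvEnt]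
    by_cases h0 : l ∈ pvG0 <;> by_cases h1 : l ∈ pvG1 <;>
      by_cases h2 : l ∈ pvG2 <;> by_cases h3 : l ∈ pvG3 <;>
      simp [h0, h1, h2, h3, List.any_eq_true] <;>
      split_ifs <;> simp_all [pvBetter]

-- A's group-scan over the set of labels = a scan of the labels over the group
lemma any_swap (g ls : List String) :
    g.any (fun x => PySem.Set.contains (PySem.Set.ofList ls) x)
      = ls.any (fun l => decide (l ∈ g)) := by
  refine Bool.eq_iff_iff.mpr ?_
  simp only [List.any_eq_true, decide_eq_true_eq]
  constructor
  · rintro ⟨x, hx, hc⟩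
    exact ⟨x, (PySem.Set.mem_ofList _ _).1 ((PySem.Set.contains_iff _ _).1 hc), hx⟩
  · rintro ⟨l, hl, hg⟩
    exact ⟨l, hg, (PySem.Set.contains_iff _ _).2 ((PySem.Set.mem_ofList _ _).2 hl)⟩

-- ===== VERDICT (by name: the statement is the Claim_ definition above) =====
theorem templated_reply_spec : Claim_equal_templated_reply := by
  intro labels_list text _
  show templated_reply labels_list text = templated_reply_alt labels_list text
  unfold templated_reply templated_reply_alt
  rw [foldl_pvStep, pvRes_char]
  simp only [any_swap]
  split_ifs <;> rfl
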